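-- pv_equiv track=rewrite | github.com/kzhdev/rithmic_zorro_plugin | tools/config_generator.py | reorder_systems
-- ===== SOURCE A (Python) =====
-- from collections import OrderedDict
--
-- def reorder_systems(data):
--     """
--     Return an OrderedDict where keys starting with "Rithmic" come first (sorted),
--     then all other keys (also sorted).
--     """
--     ordered = OrderedDict()
--     # Rithmic* first
--     for system in sorted(data):
--         if system.startswith("Rithmic"):
--             ordered[system] = data[system]
--     # Others next
--     for system in sorted(data):
--         if not system.startswith("Rithmic"):
--             ordered[system] = data[system]
--     return ordered
-- ===== SOURCE B (Python) =====
-- from collections import OrderedDict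
--
-- def reorder_systems(data):
--     """
--     Return an OrderedDict where keys starting with "Rithmic" come first (sorted),
--     then all other keys (also sorted).
--     """
--     keys = sorted(data, key=lambda k: (not k.startswith("Rithmic"), k))
--     return OrderedDict((k, data[k]) for k in keys)
-- ===== Notes on version B (the rewrite author's own statement) =====
-- stated objective: simpler
-- what changed: Replaces the two separate filtered passes over sorted(data) and the incremental OrderedDict insertion with a single sort under the composite key (not k.startswith('Rithmic'), k), building the OrderedDict once from that ordering.
import Mathlib
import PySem

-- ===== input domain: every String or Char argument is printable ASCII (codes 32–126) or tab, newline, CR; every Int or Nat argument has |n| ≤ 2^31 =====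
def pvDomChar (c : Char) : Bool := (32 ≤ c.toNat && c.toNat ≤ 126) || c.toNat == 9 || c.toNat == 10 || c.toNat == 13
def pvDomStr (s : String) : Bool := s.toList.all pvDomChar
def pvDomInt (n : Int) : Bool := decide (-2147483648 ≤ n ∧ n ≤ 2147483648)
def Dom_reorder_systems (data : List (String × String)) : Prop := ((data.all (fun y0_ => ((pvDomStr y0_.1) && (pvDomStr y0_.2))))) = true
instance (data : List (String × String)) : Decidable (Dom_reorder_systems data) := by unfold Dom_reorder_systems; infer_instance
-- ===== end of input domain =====

-- B replaces A's two filtered passes over the sorted keys with a single sort under the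
-- composite key (not startswith('Rithmic'), key); same cost, a simpler one-pass construction.


-- ===== PORT A =====
def reorder_systems (data : List (String × String)) : List (String × String) :=
  let d := PySem.Dict.ofList data
  let ordered : PySem.Dict String String :=
    (PySem.List.sorted d.keys (fun k => k)).foldl
      (fun o system =>
        if PySem.Str.startswith system "Rithmic" then o.insert system (d.getD system "") else o)
      PySem.Dict.empty
  let ordered :=
    (PySem.List.sorted d.keys (fun k => k)).foldl
      (fun o system =>
        if !PySem.Str.startswith system "Rithmic" then o.insert system (d.getD system "") else o)
      ordered
  ordered.items

-- ===== PORT B =====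
def reorder_systems_alt (data : List (String × String)) : List (String × String) :=
  let d := PySem.Dict.ofList data
  let keys := PySem.List.sorted2 d.keys
    (fun k => !PySem.Str.startswith k "Rithmic") (fun k => k)
  (PySem.Dict.ofList (keys.map (fun k => (k, d.getD k "")))).items

-- ===== PRECONDITION & SPEC =====
def Spec_reorder_systems (data : List (String × String)) (out : List (String × String)) : Prop := out = reorder_systems_alt data
instance (data : List (String × String)) (out : List (String × String)) : Decidable (Spec_reorder_systems data out) := by unfold Spec_reorder_systems; infer_instance

-- ===== CLAIM (what is proved, stated in full; the proofs are below) =====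
def Claim_equal_reorder_systems : Prop := ∀ (data : List (String × String)), Dom_reorder_systems data → Spec_reorder_systems data (reorder_systems data)

-- ===== LEMMAS AND PROOFS =====

-- Items of A's guarded insertion loop: fresh distinct keys are appended in order.
lemma items_foldl_insert_if (q : String → Bool) (f : String → String) :
    ∀ (ks : List String) (d0 : PySem.Dict String String),
      ks.Nodup → (∀ k ∈ ks, q k = true → d0.contains k = false) →
      (ks.foldl (fun o k => if q k then o.insert k (f k) else o) d0).items
        = d0.items ++ (ks.filter q).map (fun k => (k, f k)) := by
  intro ks
  induction ks with
  | nil => intro d0 _ _; simp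
  | cons k ks ih =>
    intro d0 hnd hfresh
    simp only [List.foldl_cons, List.filter_cons]
    by_cases hq : q k = true
    · rw [hq]
      simp only [if_true]
      rw [ih (d0.insert k (f k)) hnd.of_cons]
      · have hc : d0.contains k = false := hfresh k (by simp) hq
        simp only [PySem.Dict.insert, hc]
        simp
      · intro k' hk' hq'
        rw [PySem.Dict.contains_insert]
        have hne : k' ≠ k := fun h => (List.nodup_cons.mp hnd).1 (h ▸ hk')
        simp [hne, hfresh k' (by simp [hk']) hq']
    · rw [if_neg hq, if_neg hq]
      exact ih d0 hnd.of_cons (fun k' hk' => hfresh k' (by simp [hk']))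

-- Items of B's OrderedDict built from pairs with distinct fresh keys.
lemma items_update_fresh :
    ∀ (ps : List (String × String)) (d0 : PySem.Dict String String),
      (ps.map Prod.fst).Nodup → (∀ k ∈ ps.map Prod.fst, d0.contains k = false) →
      (d0.update ps).items = d0.items ++ ps := by
  intro ps
  induction ps with
  | nil => intro d0 _ _; simp [PySem.Dict.update]
  | cons kv ps ih =>
    intro d0 hnd hfresh
    simp only [PySem.Dict.update, List.foldl_cons]
    have hc : d0.contains kv.1 = false := hfresh kv.1 (by simp)
    have := ih (d0.insert kv.1 kv.2) ?nd ?fr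
    · simp only [PySem.Dict.update] at this
      rw [this]
      simp [PySem.Dict.insert, hc]
    case nd =>
      have : (kv.1 :: ps.map Prod.fst).Nodup := by simpa using hnd
      exact (List.nodup_cons.mp this).2
    case fr =>
      intro k' hk'
      rw [PySem.Dict.contains_insert]
      have hnd' : (kv.1 :: ps.map Prod.fst).Nodup := by simpa using hnd
      have hne : k' ≠ kv.1 := fun h => (List.nodup_cons.mp hnd').1 (h ▸ hk')
      simp [hne, hfresh k' (by simp at hk' ⊢; right; exact hk')]

-- B's composite-key sort is the plain sort under the lexicographic (Bool, String) key.
lemma sorted2_eq_sorted_lex (p : String → Bool) (ks : List String) :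
    PySem.List.sorted2 ks (fun k => !p k) (fun k => k)
      = PySem.List.sorted ks (fun k => toLex ((!p k), k)) := by
  rw [PySem.List.sorted2, PySem.List.sorted_eq_foldl_insertBy]
  simp only [if_neg (by decide : ¬ (false = true))]
  congr 1
  funext acc x
  congr 1
  funext a b
  cases hpa : p a <;> cases hpb : p b <;>
    simp [Prod.Lex.lt_iff, Bool.lt_iff]

-- The composite-key sort is the p-block of the plain sort followed by the rest.
lemma sorted_lex_eq_filter_append (p : String → Bool) (ks : List String) (hnd : ks.Nodup) :
    PySem.List.sorted ks (fun k => toLex ((!p k), k))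
      = (PySem.List.sorted ks (fun k => k)).filter p
        ++ (PySem.List.sorted ks (fun k => k)).filter (fun k => !p k) := by
  set S := PySem.List.sorted ks (fun k => k) with hS
  have hperm : (S.filter p ++ S.filter (fun k => !p k)).Perm ks :=
    (List.filter_append_perm p S).trans (PySem.List.sorted_perm ks (fun k => k) false)
  apply PySem.List.sorted_eq_of_perm_of_pairwise_lt _ _ _ hperm
  have hle : S.Pairwise (fun a b => a ≤ b) := by
    simpa using PySem.List.sorted_pairwise ks (fun k => k)
  have hndS : S.Nodup := ((PySem.List.sorted_perm ks (fun k => k) false).nodup_iff).mpr hnd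
  have hlt : S.Pairwise (fun a b : String => a < b) :=
    (hle.and hndS).imp (fun h => lt_of_le_of_ne h.1 h.2)
  rw [List.pairwise_append]
  refine ⟨?_, ?_, ?_⟩
  · refine (hlt.filter p).imp_of_mem ?_
    intro a b ha hb hab
    have hpa := List.of_mem_filter ha
    have hpb := List.of_mem_filter hb
    exact Prod.Lex.lt_iff.mpr (Or.inr ⟨by simp [hpa, hpb], hab⟩)
  · refine (hlt.filter _).imp_of_mem ?_
    intro a b ha hb hab
    have hpa := List.of_mem_filter ha
    have hpb := List.of_mem_filter hb
    exact Prod.Lex.lt_iff.mpr (Or.inr ⟨by simp at hpa hpb; simp [hpa, hpb], hab⟩)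
  · intro a ha b hb
    have hpa := List.of_mem_filter ha
    have hpb := List.of_mem_filter hb
    simp at hpb
    exact Prod.Lex.lt_iff.mpr (Or.inl (by simp [hpa, hpb, Bool.lt_iff]))

-- ===== VERDICT (by name: the statement is the Claim_ definition above) =====
theorem reorder_systems_spec : Claim_equal_reorder_systems := by
  intro data _
  unfold Spec_reorder_systems reorder_systems reorder_systems_alt
  set d := PySem.Dict.ofList data with hd
  set p : String → Bool := fun k => PySem.Str.startswith k "Rithmic" with hp
  set f : String → String := fun k => d.getD k "" with hf
  set S := PySem.List.sorted d.keys (fun k => k) with hSdef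
  have hndk : d.keys.Nodup := PySem.Dict.nodup_keys_ofList data
  have hndS : S.Nodup := ((PySem.List.sorted_perm _ _ false).nodup_iff).mpr hndk
  have h1 : (S.foldl (fun o k => if p k then o.insert k (f k) else o) PySem.Dict.empty).items
      = (S.filter p).map (fun k => (k, f k)) := by
    rw [items_foldl_insert_if p f S PySem.Dict.empty hndS (by intro k _ _; simp)]
    simp [PySem.Dict.empty]
  set d1 := S.foldl (fun o k => if p k then o.insert k (f k) else o) PySem.Dict.empty with hd1
  have hkeys1 : d1.keys = S.filter p := by
    rw [PySem.Dict.keys, h1]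
    simp [Function.comp_def]
  have h2 : (S.foldl (fun o k => if !p k then o.insert k (f k) else o) d1).items
      = d1.items ++ (S.filter (fun k => !p k)).map (fun k => (k, f k)) := by
    apply items_foldl_insert_if (fun k => !p k) f S d1 hndS
    intro k _ hq
    rw [PySem.Dict.contains_eq_decide_mem_keys, hkeys1]
    simp only [decide_eq_false_iff_not]
    intro hmem
    have := List.of_mem_filter hmem
    simp [this] at hq
  have hkeys2 : PySem.List.sorted2 d.keys (fun k => !p k) (fun k => k)
      = S.filter p ++ S.filter (fun k => !p k) := by
    rw [sorted2_eq_sorted_lex p d.keys, sorted_lex_eq_filter_append p d.keys hndk]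
  have h3 : (PySem.Dict.ofList ((S.filter p ++ S.filter (fun k => !p k)).map (fun k => (k, f k)))).items
      = (S.filter p ++ S.filter (fun k => !p k)).map (fun k => (k, f k)) := by
    rw [PySem.Dict.ofList]
    rw [items_update_fresh _ PySem.Dict.empty]
    · simp [PySem.Dict.empty]
    · have : ((S.filter p ++ S.filter (fun k => !p k)).map (fun k => (k, f k))).map Prod.fst
          = S.filter p ++ S.filter (fun k => !p k) := by simp [Function.comp_def]
      rw [this]
      exact ((List.filter_append_perm p S).nodup_iff).mpr hndS
    · intro k _; simp [PySem.Dict.empty, PySem.Dict.contains]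
  show (S.foldl (fun o k => if !p k then o.insert k (f k) else o) d1).items = _
  rw [h2, h1]
  show _ = (PySem.Dict.ofList ((PySem.List.sorted2 d.keys (fun k => !p k) (fun k => k)).map (fun k => (k, f k)))).items
  rw [hkeys2, h3, List.map_append]
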